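-- pv_equiv track=rewrite | github.com/evlog/SysPy | SysPy_ver/funcs/_dataflow_operator_repl.py | dataflow_operator_repl
-- ===== SOURCE A (Python) =====
-- def dataflow_operator_repl(dataflow_assign):
--        """
--        FUNCTION: dataflow_operator_repl(a[])
--               a: list with the data flow assignments
--
--        Libraries statement of the *.vhd file.
--        - Operators replacement in the dataflow assignments.
--        """
--
-- # Python's variable declerations
-- #----------------------------------------------------------------------------------------------------------------------------------
--
-- #----------------------------------------------------------------------------------------------------------------------------------
--
-- # remove space characters
-- #----------------------------------------------------------------------------------------------------------------------------------
--        for i in range(0, len(dataflow_assign)):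
--               dataflow_assign[i][0] = dataflow_assign[i][0].replace(' ', '')
--               if (dataflow_assign[i] != "\n"):
--                      dataflow_assign[i][0] = dataflow_assign[i][0].replace("\n", '')
-- #----------------------------------------------------------------------------------------------------------------------------------
--
-- # replacement of arithmetic operands
-- #----------------------------------------------------------------------------------------------------------------------------------
--        ## replacement in the data flow assignments of the '=' characters with " = "
--        for i in range(0, len(dataflow_assign)):
--               dataflow_assign[i][0] = dataflow_assign[i][0].replace('=', " <= ")
--
--        ## replacement in the data flow assignments of the '+' characters with " + "
--        for i in range(0, len(dataflow_assign)):
--               dataflow_assign[i][0] = dataflow_assign[i][0].replace('+', " + ")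
--
--        ## replacement in the data flow assignments of the '+' characters with " + "
--        for i in range(0, len(dataflow_assign)):
--               dataflow_assign[i][0] = dataflow_assign[i][0].replace('-', " - ")
--
--        ## replacement in the data flow assignments of the '*' characters with " * "
--        for i in range(0, len(dataflow_assign)):
--               dataflow_assign[i][0] = dataflow_assign[i][0].replace('*', " * ")
-- #----------------------------------------------------------------------------------------------------------------------------------
--
--        for i in range(0, len(dataflow_assign)):
--               dataflow_assign[i][0] = ("\t" + dataflow_assign[i][0] + ";\n")
--
--        return dataflow_assign
-- ===== SOURCE B (Python) =====
-- _MAP = {' ': '', '\n': '', '=': ' <= ', '+': ' + ', '-': ' - ', '*': ' * '}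
--
--
-- def _convert(s):
--     # single-pass cursor scanner: copy maximal runs of ordinary characters,
--     # emit each special character's replacement when reached, join once
--     pieces = []
--     i = 0
--     n = len(s)
--     while i < n:
--         j = i
--         while j < n and s[j] not in _MAP:
--             j += 1
--         pieces.append(s[i:j])
--         if j < n:
--             pieces.append(_MAP[s[j]])
--             j += 1
--         i = j
--     return ''.join(pieces)
--
--
-- def dataflow_operator_repl(dataflow_assign):
--     for row in dataflow_assign:
--         row[0] = "\t" + _convert(row[0]) + ";\n"
--     return dataflow_assign
-- ===== Notes on version B (the rewrite author's own statement) =====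
-- stated objective: alternative
-- what changed: A's seven sequential passes (six whole-string .replace scans plus a wrapping loop) are replaced by a single-pass cursor scanner per string that copies maximal runs of ordinary characters, emits each operator's replacement as it is reached, and joins the collected pieces once while wrapping.
import Mathlib
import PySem

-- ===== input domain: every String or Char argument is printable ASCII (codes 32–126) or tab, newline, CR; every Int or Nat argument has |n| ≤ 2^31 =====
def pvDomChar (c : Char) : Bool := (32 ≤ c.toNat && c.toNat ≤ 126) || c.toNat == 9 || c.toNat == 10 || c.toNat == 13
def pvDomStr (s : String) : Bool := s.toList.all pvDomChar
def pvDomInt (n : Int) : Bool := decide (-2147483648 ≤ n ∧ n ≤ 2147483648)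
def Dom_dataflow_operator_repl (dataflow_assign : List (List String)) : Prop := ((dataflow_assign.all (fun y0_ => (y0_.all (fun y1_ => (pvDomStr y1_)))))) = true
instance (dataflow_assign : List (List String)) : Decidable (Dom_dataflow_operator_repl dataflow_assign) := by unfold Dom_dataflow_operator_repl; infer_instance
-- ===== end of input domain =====

-- B replaces A's seven passes (six .replace loops plus the wrapping loop) by one cursor scan
-- per string that copies runs of ordinary characters and emits operator replacements as reached;
-- both Pythons mutate the list in place and return it, the equivalence proved is about the
-- returned value.

-- ===== PORT A =====
-- "dataflow_assign[i][0] = f(dataflow_assign[i][0])" applied along one loop over the list;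
-- under Pre_ every row is nonempty, so updating the head is exact (Python raises IndexError on []).
def pvSetHead (f : String → String) : List String → List String
  | [] => []
  | x :: xs => f x :: xs

def dataflow_operator_repl (dataflow_assign : List (List String)) : List (List String) :=
  -- loop 1: remove ' '; the guard `dataflow_assign[i] != "\n"` compares a list with a str,
  -- which is always True in Python 3, so the "\n" removal always runs too.
  let d1 := dataflow_assign.map (pvSetHead (fun s =>
    PySem.Str.replace (PySem.Str.replace s " " "") "\n" ""))
  let d2 := d1.map (pvSetHead (fun s => PySem.Str.replace s "=" " <= "))
  let d3 := d2.map (pvSetHead (fun s => PySem.Str.replace s "+" " + "))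
  let d4 := d3.map (pvSetHead (fun s => PySem.Str.replace s "-" " - "))
  let d5 := d4.map (pvSetHead (fun s => PySem.Str.replace s "*" " * "))
  d5.map (pvSetHead (fun s => "\t" ++ s ++ ";\n"))

-- ===== PORT B =====
-- `s[j] not in _MAP`: membership in the replacement table's keys
def pvIsSpec (c : Char) : Bool :=
  c == ' ' || c == '\n' || c == '=' || c == '+' || c == '-' || c == '*'

-- `_MAP[s[j]]`: the replacement for a special character
def pvMapC (c : Char) : List Char :=
  if c = ' ' then []
  else if c = '\n' then []
  else if c = '=' then " <= ".toList
  else if c = '+' then " + ".toList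
  else if c = '-' then " - ".toList
  else if c = '*' then " * ".toList
  else [c]

-- the outer while loop of _convert: one step consumes a maximal ordinary run (the inner
-- while / `s[i:j]`) plus, if present, one special character; the piece list is concatenated
-- as it is produced (Python's final ''.join)
def pvConvGo (cs : List Char) : List Char :=
  if h : cs = [] then []
  else
    let chunk := cs.takeWhile (fun c => !pvIsSpec c)
    match hr : cs.dropWhile (fun c => !pvIsSpec c) with
    | [] => chunk
    | r :: rt => chunk ++ pvMapC r ++ pvConvGo rt
termination_by cs.length
decreasing_by
  have h1 : (cs.dropWhile (fun c => !pvIsSpec c)).length ≤ cs.length :=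
    List.length_dropWhile_le _ _
  rw [hr] at h1
  simpa using Nat.lt_of_lt_of_le (Nat.lt_succ_self _) h1

def pvConvert (s : String) : String := String.ofList (pvConvGo s.toList)

def dataflow_operator_repl_alt (dataflow_assign : List (List String)) : List (List String) :=
  dataflow_assign.map (fun row =>
    match row with
    | [] => []
    | x :: xs => ("\t" ++ pvConvert x ++ ";\n") :: xs)

-- ===== PRECONDITION & SPEC =====
-- Pre_ excludes inputs containing an empty inner list: there both Pythons raise IndexError
-- on the row[0] access.
def Pre_dataflow_operator_repl (dataflow_assign : List (List String)) : Prop :=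
  ∀ row ∈ dataflow_assign, row ≠ []
instance (dataflow_assign : List (List String)) : Decidable (Pre_dataflow_operator_repl dataflow_assign) := by unfold Pre_dataflow_operator_repl; infer_instance

def pvWitness_dataflow_operator_repl : List (List String) := [["a=b + c", "x"], ["q = r*s-t\n"]]

def Spec_dataflow_operator_repl (dataflow_assign : List (List String)) (out : List (List String)) : Prop := out = dataflow_operator_repl_alt dataflow_assign
instance (dataflow_assign : List (List String)) (out : List (List String)) : Decidable (Spec_dataflow_operator_repl dataflow_assign out) := by unfold Spec_dataflow_operator_repl; infer_instance

-- ===== CLAIM (what is proved, stated in full; the proofs are below) =====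
def Claim_equal_dataflow_operator_repl : Prop := ∀ (dataflow_assign : List (List String)), Dom_dataflow_operator_repl dataflow_assign → Pre_dataflow_operator_repl dataflow_assign → Spec_dataflow_operator_repl dataflow_assign (dataflow_operator_repl dataflow_assign)

-- ===== LEMMAS AND PROOFS =====

-- single-character replace is a character-wise flatMap
theorem replace_go_single (o : Char) (new : List Char) :
    ∀ (fuel : Nat) (l acc : List Char), l.length ≤ fuel →
      PySem.Chars.replace.go [o] new fuel l acc
        = acc.reverse ++ l.flatMap (fun c => if c = o then new else [c]) := by
  intro fuel
  induction fuel with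
  | zero =>
    intro l acc h
    have : l = [] := List.eq_nil_of_length_eq_zero (Nat.le_zero.mp h)
    subst this
    simp [PySem.Chars.replace.go]
  | succ n ih =>
    intro l acc h
    cases l with
    | nil => simp [PySem.Chars.replace.go]
    | cons c t =>
      have hlen : t.length ≤ n := by simpa using Nat.le_of_succ_le_succ h
      rw [PySem.Chars.replace.go]
      by_cases hc : c = o
      · subst hc
        have hpre : [c].isPrefixOf (c :: t) = true := by simp [List.isPrefixOf]
        simp only [hpre, if_pos, List.length_cons, List.length_nil, List.drop_succ_cons, List.drop_zero]
        rw [ih _ _ hlen]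
        simp
      · have hpre : [o].isPrefixOf (c :: t) = false := by
          simp only [List.isPrefixOf, Bool.and_eq_false_iff, beq_eq_false_iff_ne, ne_eq]
          left; exact fun h' => hc h'.symm
        simp only [hpre, Bool.false_eq_true, if_false]
        rw [ih _ _ hlen]
        simp [hc]

theorem replace_single (s : List Char) (o : Char) (new : List Char) :
    PySem.Chars.replace s [o] new = s.flatMap (fun c => if c = o then new else [c]) := by
  have hne : ([o] : List Char).isEmpty = false := rfl
  rw [PySem.Chars.replace, hne]
  simp only [Bool.false_eq_true, if_false]
  exact replace_go_single o new s.length s [] (le_refl _)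

-- the chain of six single-character replaces equals one character-wise pvMapC pass
theorem chain_eq_flatMap (s : String) :
    PySem.Str.replace
      (PySem.Str.replace
        (PySem.Str.replace
          (PySem.Str.replace
            (PySem.Str.replace (PySem.Str.replace s " " "") "\n" "")
            "=" " <= ")
          "+" " + ")
        "-" " - ")
      "*" " * "
    = String.ofList (s.toList.flatMap pvMapC) := by
  apply String.ext
  simp only [PySem.Str.toList_replace]
  have h1 : (" " : String).toList = [' '] := rfl
  have h2 : ("\n" : String).toList = ['\n'] := rfl
  have h3 : ("=" : String).toList = ['='] := rfl
  have h4 : ("+" : String).toList = ['+'] := rfl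
  have h5 : ("-" : String).toList = ['-'] := rfl
  have h6 : ("*" : String).toList = ['*'] := rfl
  rw [h1, h2, h3, h4, h5, h6]
  rw [replace_single, replace_single, replace_single, replace_single, replace_single,
      replace_single]
  simp only [String.toList_ofList]
  simp only [List.flatMap_assoc]
  apply List.flatMap_congr
  intro c _
  by_cases hsp : c = ' '
  · subst hsp; decide
  by_cases hnl : c = '\n'
  · subst hnl; decide
  by_cases heq : c = '='
  · subst heq; decide
  by_cases hpl : c = '+'
  · subst hpl; decide
  by_cases hmi : c = '-'
  · subst hmi; decide
  by_cases hst : c = '*'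
  · subst hst; decide
  simp [pvMapC, hsp, hnl, heq, hpl, hmi, hst]

-- an ordinary character is its own replacement
theorem mapC_of_not_spec (c : Char) (h : pvIsSpec c = false) : pvMapC c = [c] := by
  simp only [pvIsSpec, Bool.or_eq_false_iff, beq_eq_false_iff_ne, ne_eq] at h
  obtain ⟨⟨⟨⟨⟨h1, h2⟩, h3⟩, h4⟩, h5⟩, h6⟩ := h
  simp [pvMapC, h1, h2, h3, h4, h5, h6]

-- unfolding lemmas for the scanner
theorem convGo_drop_nil (cs : List Char) (hne : cs ≠ [])
    (h : cs.dropWhile (fun c => !pvIsSpec c) = []) :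
    pvConvGo cs = cs.takeWhile (fun c => !pvIsSpec c) := by
  rw [pvConvGo]
  simp only [dif_neg hne]
  split
  · rfl
  · next r rt h2 => rw [h] at h2; cases h2

theorem convGo_drop_cons (cs : List Char) (r : Char) (rt : List Char) (hne : cs ≠ [])
    (h : cs.dropWhile (fun c => !pvIsSpec c) = r :: rt) :
    pvConvGo cs = cs.takeWhile (fun c => !pvIsSpec c) ++ pvMapC r ++ pvConvGo rt := by
  rw [pvConvGo]
  simp only [dif_neg hne]
  split
  · next h2 => rw [h] at h2; cases h2
  · next r' rt' h2 =>
      rw [h] at h2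
      cases h2
      rfl

-- a run of ordinary characters is its own replacement
theorem chunk_flatMap_id (cs : List Char) :
    (cs.takeWhile (fun c => !pvIsSpec c)).flatMap pvMapC
      = cs.takeWhile (fun c => !pvIsSpec c) := by
  have h1 : (cs.takeWhile (fun c => !pvIsSpec c)).flatMap pvMapC
      = (cs.takeWhile (fun c => !pvIsSpec c)).flatMap (fun c => [c]) := by
    apply List.flatMap_congr
    intro c hc
    exact mapC_of_not_spec c (by simpa using List.mem_takeWhile_imp hc)
  rw [h1]
  simp

-- B's scanner computes the character-wise flatMap
theorem convGo_eq_flatMap (cs : List Char) : pvConvGo cs = cs.flatMap pvMapC := by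
  induction cs using pvConvGo.induct with
  | case1 => simp [pvConvGo]
  | case2 cs hne hr =>
    rw [convGo_drop_nil cs hne hr]
    conv_rhs => rw [← List.takeWhile_append_dropWhile (p := fun c => !pvIsSpec c) (l := cs)]
    rw [hr, List.append_nil, chunk_flatMap_id]
  | case3 cs hne r rt hr ih =>
    rw [convGo_drop_cons cs r rt hne hr, ih]
    conv_rhs => rw [← List.takeWhile_append_dropWhile (p := fun c => !pvIsSpec c) (l := cs)]
    rw [hr]
    simp [chunk_flatMap_id cs]

theorem convert_eq_chain (s : String) :
    "\t" ++ pvConvert s ++ ";\n"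
      = "\t" ++
        PySem.Str.replace
          (PySem.Str.replace
            (PySem.Str.replace
              (PySem.Str.replace
                (PySem.Str.replace (PySem.Str.replace s " " "") "\n" "")
                "=" " <= ")
              "+" " + ")
            "-" " - ")
          "*" " * " ++ ";\n" := by
  rw [chain_eq_flatMap, pvConvert, convGo_eq_flatMap]

-- ===== VERDICT (by name: the statement is the Claim_ definition above) =====
theorem dataflow_operator_repl_spec : Claim_equal_dataflow_operator_repl := by
  intro d _ hpre
  unfold Spec_dataflow_operator_repl dataflow_operator_repl dataflow_operator_repl_alt
  simp only [List.map_map]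
  apply List.map_congr_left
  intro row hrow
  cases row with
  | nil => exact absurd rfl (hpre _ hrow)
  | cons x xs =>
    simp only [Function.comp, pvSetHead]
    rw [← convert_eq_chain]
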